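-- pv_equiv track=rewrite | github.com/blackhashcode/MLOps_converter | src/converter/notebook_parser.py | _categorize_code_cell
-- ===== SOURCE A (Python) =====
-- def _categorize_code_cell(source: str) -> str:
--     """Categorize code cells for better organization"""
--     if not source.strip():
--         return 'empty'
--
--     source_lower = source.lower()
--
--     if any(imp in source_lower for imp in ['import', 'from ']):
--         return 'imports'
--     elif any(pattern in source_lower for pattern in ['def ', 'class ', 'function']):
--         return 'function_definitions'
--     elif any(pattern in source_lower for pattern in ['model', 'train', 'fit', 'compile']):
--         return 'model_training'
--     elif any(pattern in source_lower for pattern in ['plot', 'visualize', 'plt.', 'seaborn']):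
--         return 'visualization'
--     elif any(pattern in source_lower for pattern in ['preprocess', 'clean', 'transform']):
--         return 'data_processing'
--     elif any(pattern in source_lower for pattern in ['test', 'assert', 'check']):
--         return 'testing'
--     else:
--         return 'general_code'
-- ===== SOURCE B (Python) =====
-- _PATTERNS = [
--     ('import', 0), ('from ', 0),
--     ('def ', 1), ('class ', 1), ('function', 1),
--     ('model', 2), ('train', 2), ('fit', 2), ('compile', 2),
--     ('plot', 3), ('visualize', 3), ('plt.', 3), ('seaborn', 3),
--     ('preprocess', 4), ('clean', 4), ('transform', 4),
--     ('test', 5), ('assert', 5), ('check', 5),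
-- ]
-- _NAMES = ['imports', 'function_definitions', 'model_training',
--           'visualization', 'data_processing', 'testing', 'general_code']
--
--
-- def _categorize_code_cell(source: str) -> str:
--     """Categorize code cells: single positional sweep keeping the minimum
--     category rank of any pattern starting at each index."""
--     if not source.strip():
--         return 'empty'
--     s = source.lower()
--     best = 6
--     for i in range(len(s)):
--         for pat, rank in _PATTERNS:
--             if rank < best and s.startswith(pat, i):
--                 best = rank
--     return _NAMES[best]
-- ===== Notes on version B (the rewrite author's own statement) =====
-- stated objective: alternative
-- what changed: Replaces the six ordered any-substring-search branches by a single left-to-right positional sweep that tests all 19 patterns as prefixes at each index and accumulates the minimum category rank, which then indexes the category-name table.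
import Mathlib
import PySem

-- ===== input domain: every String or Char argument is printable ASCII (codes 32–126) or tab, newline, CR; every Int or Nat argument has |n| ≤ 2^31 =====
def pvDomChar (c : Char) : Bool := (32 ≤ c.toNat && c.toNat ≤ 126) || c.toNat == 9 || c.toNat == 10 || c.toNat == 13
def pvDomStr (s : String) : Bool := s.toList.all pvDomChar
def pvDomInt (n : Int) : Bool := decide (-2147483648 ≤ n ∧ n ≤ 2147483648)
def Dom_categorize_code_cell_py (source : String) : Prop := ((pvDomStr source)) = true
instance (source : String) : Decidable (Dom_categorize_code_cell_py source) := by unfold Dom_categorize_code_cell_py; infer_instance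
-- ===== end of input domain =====

-- B replaces A's six ordered any-substring branches by one positional sweep over the
-- lowered string that keeps the minimum category rank of any pattern starting at each
-- index (alternative decomposition, same asymptotic cost).


-- ===== PORT A =====
def categorize_code_cell_py (source : String) : String :=
  if PySem.Str.strip source = "" then "empty"
  else
    let source_lower := PySem.Str.lower source
    if ["import", "from "].any (fun imp => PySem.Str.isIn imp source_lower) then "imports"
    else if ["def ", "class ", "function"].any (fun p => PySem.Str.isIn p source_lower) then "function_definitions"
    else if ["model", "train", "fit", "compile"].any (fun p => PySem.Str.isIn p source_lower) then "model_training"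
    else if ["plot", "visualize", "plt.", "seaborn"].any (fun p => PySem.Str.isIn p source_lower) then "visualization"
    else if ["preprocess", "clean", "transform"].any (fun p => PySem.Str.isIn p source_lower) then "data_processing"
    else if ["test", "assert", "check"].any (fun p => PySem.Str.isIn p source_lower) then "testing"
    else "general_code"

-- ===== PORT B =====
-- the 19 (pattern, category-rank) pairs of Source B, in Source B's order
def pvPatterns : List (String × Nat) :=
  [("import", 0), ("from ", 0),
   ("def ", 1), ("class ", 1), ("function", 1),
   ("model", 2), ("train", 2), ("fit", 2), ("compile", 2),
   ("plot", 3), ("visualize", 3), ("plt.", 3), ("seaborn", 3),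
   ("preprocess", 4), ("clean", 4), ("transform", 4),
   ("test", 5), ("assert", 5), ("check", 5)]

def pvNames : List String :=
  ["imports", "function_definitions", "model_training",
   "visualization", "data_processing", "testing", "general_code"]

-- Source B's inner loop at one position i: s.startswith(pat, i) is 'pat prefix of the
-- char-list suffix at i' (exact for these ASCII strings); ported by hand as a fold.
def pvRankAt (l : List Char) (b : Nat) : Nat :=
  pvPatterns.foldl (fun b pr => if pr.2 < b ∧ pr.1.toList.isPrefixOf l then pr.2 else b) b

-- Source B's outer loop: best = fold of pvRankAt over the positions 0..len-1, starting at 6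
def pvBest (cs : List Char) : Nat :=
  (List.range cs.length).foldl (fun b i => pvRankAt (cs.drop i) b) 6

def categorize_code_cell_py_alt (source : String) : String :=
  if PySem.Str.strip source = "" then "empty"
  else pvNames.getD (pvBest (PySem.Str.lower source).toList) "general_code"

-- ===== PRECONDITION & SPEC =====
def Spec_categorize_code_cell_py (source : String) (out : String) : Prop := out = categorize_code_cell_py_alt source
instance (source : String) (out : String) : Decidable (Spec_categorize_code_cell_py source out) := by unfold Spec_categorize_code_cell_py; infer_instance

-- ===== CLAIM (what is proved, stated in full; the proofs are below) =====
def Claim_equal_categorize_code_cell_py : Prop := ∀ (source : String), Dom_categorize_code_cell_py source → Spec_categorize_code_cell_py source (categorize_code_cell_py source)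

-- ===== LEMMAS AND PROOFS =====

-- generic facts about the inner (pattern) fold, over an arbitrary pattern list
theorem rk_le_init (ps : List (String × Nat)) (l : List Char) (b : Nat) :
    ps.foldl (fun b pr => if pr.2 < b ∧ pr.1.toList.isPrefixOf l then pr.2 else b) b ≤ b := by
  induction ps generalizing b with
  | nil => simp
  | cons a ps ih =>
      simp only [List.foldl_cons]
      refine le_trans (ih _) ?_
      split <;> omega

theorem rk_le_mem (ps : List (String × Nat)) (l : List Char) (b : Nat)
    (p : String) (r : Nat) (hmem : (p, r) ∈ ps) (hpre : p.toList <+: l) :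
    ps.foldl (fun b pr => if pr.2 < b ∧ pr.1.toList.isPrefixOf l then pr.2 else b) b ≤ r := by
  induction ps generalizing b with
  | nil => simp at hmem
  | cons a ps ih =>
      simp only [List.foldl_cons]
      rcases List.mem_cons.mp hmem with h | h
      · subst h
        refine le_trans (rk_le_init _ _ _) ?_
        split
        · omega
        · rename_i hc
          rw [List.isPrefixOf_iff_prefix] at hc
          simp only [not_and] at hc
          by_cases hrb : r < b
          · exact absurd hpre (hc hrb)
          · omega
      · exact ih _ h

theorem rk_cases (ps : List (String × Nat)) (l : List Char) (b : Nat) :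
    ps.foldl (fun b pr => if pr.2 < b ∧ pr.1.toList.isPrefixOf l then pr.2 else b) b = b ∨
      ∃ pr ∈ ps, pr.1.toList <+: l ∧
        ps.foldl (fun b pr => if pr.2 < b ∧ pr.1.toList.isPrefixOf l then pr.2 else b) b = pr.2 := by
  induction ps generalizing b with
  | nil => left; simp
  | cons a ps ih =>
      simp only [List.foldl_cons]
      rcases ih (if a.2 < b ∧ a.1.toList.isPrefixOf l then a.2 else b) with h | ⟨pr, hm, hp, he⟩
      · rw [h]
        split
        · rename_i hc
          rw [List.isPrefixOf_iff_prefix] at hc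
          exact Or.inr ⟨a, List.mem_cons_self .., hc.2, rfl⟩
        · exact Or.inl rfl
      · exact Or.inr ⟨pr, List.mem_cons_of_mem _ hm, hp, he⟩

theorem pvRankAt_le (l : List Char) (b : Nat) : pvRankAt l b ≤ b :=
  rk_le_init pvPatterns l b

theorem pvRankAt_le_mem (l : List Char) (b : Nat) (p : String) (r : Nat)
    (hmem : (p, r) ∈ pvPatterns) (hpre : p.toList <+: l) : pvRankAt l b ≤ r :=
  rk_le_mem pvPatterns l b p r hmem hpre

-- the outer (position) fold of B
theorem bf_le_init (cs : List Char) (n b : Nat) :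
    (List.range n).foldl (fun b i => pvRankAt (cs.drop i) b) b ≤ b := by
  induction n generalizing b with
  | zero => simp
  | succ n ih =>
      rw [List.range_succ, List.foldl_append]
      simp only [List.foldl_cons, List.foldl_nil]
      exact le_trans (pvRankAt_le _ _) (ih b)

theorem bf_le (cs : List Char) (n b : Nat) (i : Nat) (hi : i < n)
    (p : String) (r : Nat) (hmem : (p, r) ∈ pvPatterns) (hpre : p.toList <+: cs.drop i) :
    (List.range n).foldl (fun b i => pvRankAt (cs.drop i) b) b ≤ r := by
  induction n with
  | zero => omega
  | succ n ih =>
      rw [List.range_succ, List.foldl_append]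
      simp only [List.foldl_cons, List.foldl_nil]
      by_cases h : i = n
      · subst h
        exact pvRankAt_le_mem _ _ _ _ hmem hpre
      · exact le_trans (pvRankAt_le _ _) (ih (by omega))

theorem bf_cases (cs : List Char) (n b : Nat) :
    (List.range n).foldl (fun b i => pvRankAt (cs.drop i) b) b = b ∨
      ∃ i < n, ∃ pr ∈ pvPatterns, pr.1.toList <+: cs.drop i ∧
        (List.range n).foldl (fun b i => pvRankAt (cs.drop i) b) b = pr.2 := by
  induction n with
  | zero => left; simp
  | succ n ih =>
      rw [List.range_succ, List.foldl_append]
      simp only [List.foldl_cons, List.foldl_nil]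
      rcases rk_cases pvPatterns (cs.drop n)
          ((List.range n).foldl (fun b i => pvRankAt (cs.drop i) b) b) with h | ⟨pr, hm, hp, he⟩
      · rw [pvRankAt, h]
        rcases ih with h' | ⟨i, hi, pr, hm, hp, he⟩
        · exact Or.inl h'
        · exact Or.inr ⟨i, by omega, pr, hm, hp, he⟩
      · exact Or.inr ⟨n, by omega, pr, hm, hp, he⟩

-- lower bound on B's best: if no pattern of rank < k matches anywhere, best ≥ k (k ≤ 6)
theorem bf_ge (cs : List Char) (k : Nat) (hk : k ≤ 6)
    (h : ∀ pr ∈ pvPatterns, pr.2 < k → ¬ ∃ i < cs.length, pr.1.toList <+: cs.drop i) :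
    k ≤ (List.range cs.length).foldl (fun b i => pvRankAt (cs.drop i) b) 6 := by
  rcases bf_cases cs cs.length 6 with he | ⟨i, hi, pr, hm, hp, he⟩
  · omega
  · rw [he]
    by_contra hlt
    exact h pr hm (by omega) ⟨i, hi, hp⟩

theorem pvBest_le (cs : List Char) (i : Nat) (hi : i < cs.length)
    (p : String) (r : Nat) (hmem : (p, r) ∈ pvPatterns) (hpre : p.toList <+: cs.drop i) :
    pvBest cs ≤ r :=
  bf_le cs cs.length 6 i hi p r hmem hpre

theorem pvBest_ge (cs : List Char) (k : Nat) (hk : k ≤ 6)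
    (h : ∀ pr ∈ pvPatterns, pr.2 < k → ¬ ∃ i < cs.length, pr.1.toList <+: cs.drop i) :
    k ≤ pvBest cs :=
  bf_ge cs k hk h

theorem pvBest_le6 (cs : List Char) : pvBest cs ≤ 6 :=
  bf_le_init cs cs.length 6

-- A's substring test, as existence of a matching position strictly inside the string
theorem isIn_iff_pos (p s : String) (hp : p.toList ≠ []) :
    PySem.Str.isIn p s = true ↔ ∃ i < s.toList.length, p.toList <+: s.toList.drop i := by
  rw [PySem.Str.isIn_iff_infix, ← PySem.Chars.isIn_iff_infix,
      ← PySem.Chars.exists_prefix_drop_iff_isIn]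
  constructor
  · rintro ⟨j, hj⟩
    refine ⟨j, ?_, hj⟩
    by_contra hge
    rw [List.drop_eq_nil_of_le (by omega)] at hj
    exact hp (List.prefix_nil.mp hj)
  · rintro ⟨i, _, hi⟩; exact ⟨i, hi⟩

set_option maxHeartbeats 1000000 in
theorem categorize_code_cell_eq (source : String) :
    categorize_code_cell_py source = categorize_code_cell_py_alt source := by
  unfold categorize_code_cell_py categorize_code_cell_py_alt
  by_cases hs : PySem.Str.strip source = ""
  · rw [if_pos hs, if_pos hs]
  · rw [if_neg hs, if_neg hs]
    set sl := PySem.Str.lower source with hsl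
    set cs := sl.toList with hcs
    set best := pvBest cs with hbest
    have hiff : ∀ p : String, p.toList ≠ [] →
        (PySem.Str.isIn p sl = true ↔ ∃ i < cs.length, p.toList <+: cs.drop i) := by
      intro p hp; exact isIn_iff_pos p sl hp
    by_cases h0 : (["import", "from "].any (fun imp => PySem.Str.isIn imp sl)) = true
    · have hd := h0
      simp only [List.any_cons, List.any_nil, Bool.or_eq_true, Bool.or_false] at hd
      have hle : best ≤ 0 := by
        rcases hd with h | h
        all_goals
          rcases (hiff _ (by decide)).mp h with ⟨i, hi, hp⟩
          exact pvBest_le cs i hi _ 0 (by decide) hp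
      have hbk : best = 0 := Nat.le_zero.mp hle
      rw [if_pos h0, hbk]
      rfl
    have n0 := h0
    simp only [List.any_cons, List.any_nil, Bool.or_eq_true, Bool.or_false, not_or] at n0
    by_cases h1 : (["def ", "class ", "function"].any (fun p => PySem.Str.isIn p sl)) = true
    · have hd := h1
      simp only [List.any_cons, List.any_nil, Bool.or_eq_true, Bool.or_false] at hd
      have hle : best ≤ 1 := by
        rcases hd with h | h | h
        all_goals
          rcases (hiff _ (by decide)).mp h with ⟨i, hi, hp⟩
          exact pvBest_le cs i hi _ 1 (by decide) hp
      have hge : 1 ≤ best := by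
        refine pvBest_ge cs 1 (by omega) ?_
        intro pr hm hr hex
        simp only [pvPatterns, List.mem_cons, List.not_mem_nil, or_false] at hm
        rcases hm with rfl | rfl | rfl | rfl | rfl | rfl | rfl | rfl | rfl | rfl | rfl | rfl | rfl | rfl | rfl | rfl | rfl | rfl | rfl
        · exact n0.1 ((hiff _ (by decide)).mpr hex)
        · exact n0.2 ((hiff _ (by decide)).mpr hex)
        · exact absurd hr (by decide)
        · exact absurd hr (by decide)
        · exact absurd hr (by decide)
        · exact absurd hr (by decide)
        · exact absurd hr (by decide)
        · exact absurd hr (by decide)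
        · exact absurd hr (by decide)
        · exact absurd hr (by decide)
        · exact absurd hr (by decide)
        · exact absurd hr (by decide)
        · exact absurd hr (by decide)
        · exact absurd hr (by decide)
        · exact absurd hr (by decide)
        · exact absurd hr (by decide)
        · exact absurd hr (by decide)
        · exact absurd hr (by decide)
        · exact absurd hr (by decide)
      have hbk : best = 1 := le_antisymm hle hge
      rw [if_neg h0, if_pos h1, hbk]
      rfl
    have n1 := h1
    simp only [List.any_cons, List.any_nil, Bool.or_eq_true, Bool.or_false, not_or] at n1
    by_cases h2 : (["model", "train", "fit", "compile"].any (fun p => PySem.Str.isIn p sl)) = true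
    · have hd := h2
      simp only [List.any_cons, List.any_nil, Bool.or_eq_true, Bool.or_false] at hd
      have hle : best ≤ 2 := by
        rcases hd with h | h | h | h
        all_goals
          rcases (hiff _ (by decide)).mp h with ⟨i, hi, hp⟩
          exact pvBest_le cs i hi _ 2 (by decide) hp
      have hge : 2 ≤ best := by
        refine pvBest_ge cs 2 (by omega) ?_
        intro pr hm hr hex
        simp only [pvPatterns, List.mem_cons, List.not_mem_nil, or_false] at hm
        rcases hm with rfl | rfl | rfl | rfl | rfl | rfl | rfl | rfl | rfl | rfl | rfl | rfl | rfl | rfl | rfl | rfl | rfl | rfl | rfl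
        · exact n0.1 ((hiff _ (by decide)).mpr hex)
        · exact n0.2 ((hiff _ (by decide)).mpr hex)
        · exact n1.1 ((hiff _ (by decide)).mpr hex)
        · exact n1.2.1 ((hiff _ (by decide)).mpr hex)
        · exact n1.2.2 ((hiff _ (by decide)).mpr hex)
        · exact absurd hr (by decide)
        · exact absurd hr (by decide)
        · exact absurd hr (by decide)
        · exact absurd hr (by decide)
        · exact absurd hr (by decide)
        · exact absurd hr (by decide)
        · exact absurd hr (by decide)
        · exact absurd hr (by decide)
        · exact absurd hr (by decide)
        · exact absurd hr (by decide)
        · exact absurd hr (by decide)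
        · exact absurd hr (by decide)
        · exact absurd hr (by decide)
        · exact absurd hr (by decide)
      have hbk : best = 2 := le_antisymm hle hge
      rw [if_neg h0, if_neg h1, if_pos h2, hbk]
      rfl
    have n2 := h2
    simp only [List.any_cons, List.any_nil, Bool.or_eq_true, Bool.or_false, not_or] at n2
    by_cases h3 : (["plot", "visualize", "plt.", "seaborn"].any (fun p => PySem.Str.isIn p sl)) = true
    · have hd := h3
      simp only [List.any_cons, List.any_nil, Bool.or_eq_true, Bool.or_false] at hd
      have hle : best ≤ 3 := by
        rcases hd with h | h | h | h
        all_goals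
          rcases (hiff _ (by decide)).mp h with ⟨i, hi, hp⟩
          exact pvBest_le cs i hi _ 3 (by decide) hp
      have hge : 3 ≤ best := by
        refine pvBest_ge cs 3 (by omega) ?_
        intro pr hm hr hex
        simp only [pvPatterns, List.mem_cons, List.not_mem_nil, or_false] at hm
        rcases hm with rfl | rfl | rfl | rfl | rfl | rfl | rfl | rfl | rfl | rfl | rfl | rfl | rfl | rfl | rfl | rfl | rfl | rfl | rfl
        · exact n0.1 ((hiff _ (by decide)).mpr hex)
        · exact n0.2 ((hiff _ (by decide)).mpr hex)
        · exact n1.1 ((hiff _ (by decide)).mpr hex)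
        · exact n1.2.1 ((hiff _ (by decide)).mpr hex)
        · exact n1.2.2 ((hiff _ (by decide)).mpr hex)
        · exact n2.1 ((hiff _ (by decide)).mpr hex)
        · exact n2.2.1 ((hiff _ (by decide)).mpr hex)
        · exact n2.2.2.1 ((hiff _ (by decide)).mpr hex)
        · exact n2.2.2.2 ((hiff _ (by decide)).mpr hex)
        · exact absurd hr (by decide)
        · exact absurd hr (by decide)
        · exact absurd hr (by decide)
        · exact absurd hr (by decide)
        · exact absurd hr (by decide)
        · exact absurd hr (by decide)
        · exact absurd hr (by decide)
        · exact absurd hr (by decide)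
        · exact absurd hr (by decide)
        · exact absurd hr (by decide)
      have hbk : best = 3 := le_antisymm hle hge
      rw [if_neg h0, if_neg h1, if_neg h2, if_pos h3, hbk]
      rfl
    have n3 := h3
    simp only [List.any_cons, List.any_nil, Bool.or_eq_true, Bool.or_false, not_or] at n3
    by_cases h4 : (["preprocess", "clean", "transform"].any (fun p => PySem.Str.isIn p sl)) = true
    · have hd := h4
      simp only [List.any_cons, List.any_nil, Bool.or_eq_true, Bool.or_false] at hd
      have hle : best ≤ 4 := by
        rcases hd with h | h | h
        all_goals
          rcases (hiff _ (by decide)).mp h with ⟨i, hi, hp⟩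
          exact pvBest_le cs i hi _ 4 (by decide) hp
      have hge : 4 ≤ best := by
        refine pvBest_ge cs 4 (by omega) ?_
        intro pr hm hr hex
        simp only [pvPatterns, List.mem_cons, List.not_mem_nil, or_false] at hm
        rcases hm with rfl | rfl | rfl | rfl | rfl | rfl | rfl | rfl | rfl | rfl | rfl | rfl | rfl | rfl | rfl | rfl | rfl | rfl | rfl
        · exact n0.1 ((hiff _ (by decide)).mpr hex)
        · exact n0.2 ((hiff _ (by decide)).mpr hex)
        · exact n1.1 ((hiff _ (by decide)).mpr hex)
        · exact n1.2.1 ((hiff _ (by decide)).mpr hex)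
        · exact n1.2.2 ((hiff _ (by decide)).mpr hex)
        · exact n2.1 ((hiff _ (by decide)).mpr hex)
        · exact n2.2.1 ((hiff _ (by decide)).mpr hex)
        · exact n2.2.2.1 ((hiff _ (by decide)).mpr hex)
        · exact n2.2.2.2 ((hiff _ (by decide)).mpr hex)
        · exact n3.1 ((hiff _ (by decide)).mpr hex)
        · exact n3.2.1 ((hiff _ (by decide)).mpr hex)
        · exact n3.2.2.1 ((hiff _ (by decide)).mpr hex)
        · exact n3.2.2.2 ((hiff _ (by decide)).mpr hex)
        · exact absurd hr (by decide)
        · exact absurd hr (by decide)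
        · exact absurd hr (by decide)
        · exact absurd hr (by decide)
        · exact absurd hr (by decide)
        · exact absurd hr (by decide)
      have hbk : best = 4 := le_antisymm hle hge
      rw [if_neg h0, if_neg h1, if_neg h2, if_neg h3, if_pos h4, hbk]
      rfl
    have n4 := h4
    simp only [List.any_cons, List.any_nil, Bool.or_eq_true, Bool.or_false, not_or] at n4
    by_cases h5 : (["test", "assert", "check"].any (fun p => PySem.Str.isIn p sl)) = true
    · have hd := h5
      simp only [List.any_cons, List.any_nil, Bool.or_eq_true, Bool.or_false] at hd
      have hle : best ≤ 5 := by
        rcases hd with h | h | h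
        all_goals
          rcases (hiff _ (by decide)).mp h with ⟨i, hi, hp⟩
          exact pvBest_le cs i hi _ 5 (by decide) hp
      have hge : 5 ≤ best := by
        refine pvBest_ge cs 5 (by omega) ?_
        intro pr hm hr hex
        simp only [pvPatterns, List.mem_cons, List.not_mem_nil, or_false] at hm
        rcases hm with rfl | rfl | rfl | rfl | rfl | rfl | rfl | rfl | rfl | rfl | rfl | rfl | rfl | rfl | rfl | rfl | rfl | rfl | rfl
        · exact n0.1 ((hiff _ (by decide)).mpr hex)
        · exact n0.2 ((hiff _ (by decide)).mpr hex)
        · exact n1.1 ((hiff _ (by decide)).mpr hex)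
        · exact n1.2.1 ((hiff _ (by decide)).mpr hex)
        · exact n1.2.2 ((hiff _ (by decide)).mpr hex)
        · exact n2.1 ((hiff _ (by decide)).mpr hex)
        · exact n2.2.1 ((hiff _ (by decide)).mpr hex)
        · exact n2.2.2.1 ((hiff _ (by decide)).mpr hex)
        · exact n2.2.2.2 ((hiff _ (by decide)).mpr hex)
        · exact n3.1 ((hiff _ (by decide)).mpr hex)
        · exact n3.2.1 ((hiff _ (by decide)).mpr hex)
        · exact n3.2.2.1 ((hiff _ (by decide)).mpr hex)
        · exact n3.2.2.2 ((hiff _ (by decide)).mpr hex)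
        · exact n4.1 ((hiff _ (by decide)).mpr hex)
        · exact n4.2.1 ((hiff _ (by decide)).mpr hex)
        · exact n4.2.2 ((hiff _ (by decide)).mpr hex)
        · exact absurd hr (by decide)
        · exact absurd hr (by decide)
        · exact absurd hr (by decide)
      have hbk : best = 5 := le_antisymm hle hge
      rw [if_neg h0, if_neg h1, if_neg h2, if_neg h3, if_neg h4, if_pos h5, hbk]
      rfl
    have n5 := h5
    simp only [List.any_cons, List.any_nil, Bool.or_eq_true, Bool.or_false, not_or] at n5
    have hge : 6 ≤ best := by
      refine pvBest_ge cs 6 (by omega) ?_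
      intro pr hm hr hex
      simp only [pvPatterns, List.mem_cons, List.not_mem_nil, or_false] at hm
      rcases hm with rfl | rfl | rfl | rfl | rfl | rfl | rfl | rfl | rfl | rfl | rfl | rfl | rfl | rfl | rfl | rfl | rfl | rfl | rfl
      · exact n0.1 ((hiff _ (by decide)).mpr hex)
      · exact n0.2 ((hiff _ (by decide)).mpr hex)
      · exact n1.1 ((hiff _ (by decide)).mpr hex)
      · exact n1.2.1 ((hiff _ (by decide)).mpr hex)
      · exact n1.2.2 ((hiff _ (by decide)).mpr hex)
      · exact n2.1 ((hiff _ (by decide)).mpr hex)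
      · exact n2.2.1 ((hiff _ (by decide)).mpr hex)
      · exact n2.2.2.1 ((hiff _ (by decide)).mpr hex)
      · exact n2.2.2.2 ((hiff _ (by decide)).mpr hex)
      · exact n3.1 ((hiff _ (by decide)).mpr hex)
      · exact n3.2.1 ((hiff _ (by decide)).mpr hex)
      · exact n3.2.2.1 ((hiff _ (by decide)).mpr hex)
      · exact n3.2.2.2 ((hiff _ (by decide)).mpr hex)
      · exact n4.1 ((hiff _ (by decide)).mpr hex)
      · exact n4.2.1 ((hiff _ (by decide)).mpr hex)
      · exact n4.2.2 ((hiff _ (by decide)).mpr hex)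
      · exact n5.1 ((hiff _ (by decide)).mpr hex)
      · exact n5.2.1 ((hiff _ (by decide)).mpr hex)
      · exact n5.2.2 ((hiff _ (by decide)).mpr hex)
    have hbk : best = 6 := le_antisymm (pvBest_le6 cs) hge
    rw [if_neg h0, if_neg h1, if_neg h2, if_neg h3, if_neg h4, if_neg h5, hbk]
    rfl

-- ===== VERDICT (by name: the statement is the Claim_ definition above) =====
theorem categorize_code_cell_py_spec : Claim_equal_categorize_code_cell_py := by
  intro source _
  exact categorize_code_cell_eq source
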